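-- pv_equiv track=rewrite | github.com/IorenzoLF/Le_Refuge | Le_refuge/arc_agi_refuge/puzzle_15_absolu.py | appliquer_patterns
-- ===== SOURCE A (Python) =====
-- patterns_position = {
--     (0, 0): [(0, 2), (1, 0), (1, 1), (2, 0), (2, 1)],
--     (0, 1): [(0, 0), (0, 2), (2, 0), (2, 2)],
--     (0, 2): [(0, 0), (0, 1), (1, 0), (1, 2), (2, 1), (2, 2)],
--     (1, 0): [(0, 0), (0, 2), (2, 0), (2, 2)],
--     (1, 1): [(0, 0), (0, 1), (1, 0), (1, 2), (2, 1), (2, 2)],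
--     (1, 2): [(0, 0), (0, 2), (2, 0), (2, 2)],
--     (2, 0): [(0, 0), (0, 1), (1, 0), (1, 2), (2, 1), (2, 2)],
--     (2, 1): [(0, 0), (0, 2), (2, 0), (2, 2)],
--     (2, 2): [(0, 2), (1, 0), (1, 1), (2, 0), (2, 1)]
-- }
--
-- def appliquer_patterns(input_grid):
--     output_grid = [[0 for _ in range(9)] for _ in range(9)]
--
--     for x in range(3):
--         for y in range(3):
--             if input_grid[x][y] != 0:
--                 couleur = input_grid[x][y]
--                 pattern = patterns_position.get((x, y), [])
--
--                 for rel_x, rel_y in pattern: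
--                     abs_x = x * 3 + rel_x
--                     abs_y = y * 3 + rel_y
--
--                     if abs_x < 9 and abs_y < 9:
--                         output_grid[abs_x][abs_y] = couleur
--
--     return output_grid
-- ===== SOURCE B (Python) =====
-- # B: the whole pattern placement is precomputed into a constant 9x9 0/1 mask
-- # (mask[X][Y] = 1 iff A would copy the source colour into output cell (X,Y));
-- # each output cell is then just source_colour * mask_bit.
-- _MASK = [
--     [0, 0, 1, 1, 0, 1, 1, 1, 0],
--     [1, 1, 0, 0, 0, 0, 1, 0, 1],
--     [1, 1, 0, 1, 0, 1, 0, 1, 1],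
--     [1, 0, 1, 1, 1, 0, 1, 0, 1],
--     [0, 0, 0, 1, 0, 1, 0, 0, 0],
--     [1, 0, 1, 0, 1, 1, 1, 0, 1],
--     [1, 1, 0, 1, 0, 1, 0, 0, 1],
--     [1, 0, 1, 0, 0, 0, 1, 1, 0],
--     [0, 1, 1, 1, 0, 1, 1, 1, 0],
-- ]
--
-- def appliquer_patterns(input_grid):
--     return [[input_grid[X // 3][Y // 3] * _MASK[X][Y] for Y in range(9)]
--             for X in range(9)]
-- ===== Notes on version B (the rewrite author's own statement) =====
-- stated objective: alternative
-- what changed: Replaced A's scatter (loop over the 9 source cells writing colours into a mutable 9x9 zero grid via a pattern dict) by a gather with a fully precomputed constant 9x9 0/1 mask: each output cell is source_colour * mask_bit, removing the dict, the membership loop, the nonzero guard and the mutable grid entirely.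
import Mathlib
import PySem

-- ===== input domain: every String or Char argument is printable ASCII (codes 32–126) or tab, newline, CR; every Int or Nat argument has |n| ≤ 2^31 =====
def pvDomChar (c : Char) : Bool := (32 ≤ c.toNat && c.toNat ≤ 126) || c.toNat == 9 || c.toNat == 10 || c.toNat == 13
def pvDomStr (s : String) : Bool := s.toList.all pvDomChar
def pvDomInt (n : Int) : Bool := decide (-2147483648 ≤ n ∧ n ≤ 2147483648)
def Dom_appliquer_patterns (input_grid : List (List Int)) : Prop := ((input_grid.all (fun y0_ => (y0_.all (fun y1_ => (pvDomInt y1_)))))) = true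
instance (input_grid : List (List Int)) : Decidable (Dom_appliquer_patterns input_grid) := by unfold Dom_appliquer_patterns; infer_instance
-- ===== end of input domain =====

-- B replaces A's scatter through a pattern dict by a gather with a precomputed constant 9x9
-- 0/1 mask (output cell = source colour * mask bit); equivalence is proved on grids where A
-- returns (first 3 rows exist and have at least 3 cells each).

-- ===== PORT A =====
-- the module-level dict patterns_position, as an insertion-ordered PySem.Dict
def patternsPosition : PySem.Dict (Int × Int) (List (Int × Int)) :=
  PySem.Dict.ofList
    [ ((0, 0), [(0, 2), (1, 0), (1, 1), (2, 0), (2, 1)])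
    , ((0, 1), [(0, 0), (0, 2), (2, 0), (2, 2)])
    , ((0, 2), [(0, 0), (0, 1), (1, 0), (1, 2), (2, 1), (2, 2)])
    , ((1, 0), [(0, 0), (0, 2), (2, 0), (2, 2)])
    , ((1, 1), [(0, 0), (0, 1), (1, 0), (1, 2), (2, 1), (2, 2)])
    , ((1, 2), [(0, 0), (0, 2), (2, 0), (2, 2)])
    , ((2, 0), [(0, 0), (0, 1), (1, 0), (1, 2), (2, 1), (2, 2)])
    , ((2, 1), [(0, 0), (0, 2), (2, 0), (2, 2)])
    , ((2, 2), [(0, 2), (1, 0), (1, 1), (2, 0), (2, 1)]) ]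

-- input_grid[x][y]; inside Pre_ the indices are always in range, so the default is never used
def pvCell (g : List (List Int)) (x y : Int) : Int :=
  (PySem.List.pyGet? ((PySem.List.pyGet? g x).getD []) y).getD 0

-- output_grid[abs_x][abs_y] = c (indices are concrete naturals 0..8 here)
def pvSetCell (g : List (List Int)) (i j : Int) (c : Int) : List (List Int) :=
  g.set i.toNat ((g.getD i.toNat []).set j.toNat c)

-- inner loop body: scatter one source cell's colour over its pattern offsets
def scatterCell (og : List (List Int)) (x y couleur : Int) : List (List Int) :=
  (patternsPosition.getD (x, y) []).foldl (fun og rel =>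
    let abs_x := x * 3 + rel.1
    let abs_y := y * 3 + rel.2
    if abs_x < 9 ∧ abs_y < 9 then pvSetCell og abs_x abs_y couleur else og) og

-- body of the two nested loops over (x, y)
def blockStep (input_grid : List (List Int)) (x y : Int) (og : List (List Int)) : List (List Int) :=
  if pvCell input_grid x y ≠ 0 then scatterCell og x y (pvCell input_grid x y) else og

def appliquer_patterns (input_grid : List (List Int)) : List (List Int) :=
  let output0 := (PySem.List.pyRange 0 9 1).map (fun _ => (PySem.List.pyRange 0 9 1).map (fun _ => (0 : Int)))
  (PySem.List.pyRange 0 3 1).foldl (fun og x =>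
    (PySem.List.pyRange 0 3 1).foldl (fun og y => blockStep input_grid x y og) og) output0

-- ===== PORT B =====
-- the module-level constant _MASK: mask[X][Y] = 1 iff output cell (X,Y) receives its source colour
def pvMask : List (List Int) :=
  [ [(0:Int), (0:Int), (1:Int), (1:Int), (0:Int), (1:Int), (1:Int), (1:Int), (0:Int)],
    [(1:Int), (1:Int), (0:Int), (0:Int), (0:Int), (0:Int), (1:Int), (0:Int), (1:Int)],
    [(1:Int), (1:Int), (0:Int), (1:Int), (0:Int), (1:Int), (0:Int), (1:Int), (1:Int)],
    [(1:Int), (0:Int), (1:Int), (1:Int), (1:Int), (0:Int), (1:Int), (0:Int), (1:Int)],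
    [(0:Int), (0:Int), (0:Int), (1:Int), (0:Int), (1:Int), (0:Int), (0:Int), (0:Int)],
    [(1:Int), (0:Int), (1:Int), (0:Int), (1:Int), (1:Int), (1:Int), (0:Int), (1:Int)],
    [(1:Int), (1:Int), (0:Int), (1:Int), (0:Int), (1:Int), (0:Int), (0:Int), (1:Int)],
    [(1:Int), (0:Int), (1:Int), (0:Int), (0:Int), (0:Int), (1:Int), (1:Int), (0:Int)],
    [(0:Int), (1:Int), (1:Int), (1:Int), (0:Int), (1:Int), (1:Int), (1:Int), (0:Int)] ]

-- _MASK[X][Y] (always in range for X, Y in 0..8)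
def pvMaskAt (X Y : Int) : Int :=
  (PySem.List.pyGet? ((PySem.List.pyGet? pvMask X).getD []) Y).getD 0

def appliquer_patterns_alt (input_grid : List (List Int)) : List (List Int) :=
  (PySem.List.pyRange 0 9 1).map (fun X =>
    (PySem.List.pyRange 0 9 1).map (fun Y =>
      pvCell input_grid (PySem.Int.floordiv X 3) (PySem.Int.floordiv Y 3) * pvMaskAt X Y))

-- ===== PRECONDITION & SPEC =====
-- Pre_: exactly where the Python A returns: both programs index rows 0..2 and columns 0..2 of
-- the grid, so a grid with fewer than 3 rows, or whose first 3 rows have fewer than 3 cells,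
-- raises IndexError in A.
def Pre_appliquer_patterns (input_grid : List (List Int)) : Prop :=
  3 ≤ input_grid.length ∧ ∀ r ∈ input_grid.take 3, 3 ≤ r.length
instance (input_grid : List (List Int)) : Decidable (Pre_appliquer_patterns input_grid) := by unfold Pre_appliquer_patterns; infer_instance

def pvWitness_appliquer_patterns : List (List Int) := [[1, 0, 2], [0, 3, 0], [4, 0, 5]]

def Spec_appliquer_patterns (input_grid : List (List Int)) (out : List (List Int)) : Prop := out = appliquer_patterns_alt input_grid
instance (input_grid : List (List Int)) (out : List (List Int)) : Decidable (Spec_appliquer_patterns input_grid out) := by unfold Spec_appliquer_patterns; infer_instance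

-- ===== CLAIM (what is proved, stated in full; the proofs are below) =====
def Claim_equal_appliquer_patterns : Prop := ∀ (input_grid : List (List Int)), Dom_appliquer_patterns input_grid → Pre_appliquer_patterns input_grid → Spec_appliquer_patterns input_grid (appliquer_patterns input_grid)

-- ===== LEMMAS AND PROOFS =====

-- pvCell with nonnegative indices is plain list indexing
theorem pvCell_eval (g : List (List Int)) (x y : Int) (hx : 0 ≤ x) (hy : 0 ≤ y) :
    pvCell g x y = ((g[x.toNat]?.getD [])[y.toNat]?).getD 0 := by
  rw [pvCell, PySem.List.pyGet?_of_nonneg (h := hx), PySem.List.pyGet?_of_nonneg (h := hy)]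

set_option maxHeartbeats 1000000 in
theorem key_lemma (a b c d e f g h i : Int) (t0 t1 t2 : List Int) (rest : List (List Int)) :
    appliquer_patterns ((a :: b :: c :: t0) :: (d :: e :: f :: t1) :: (g :: h :: i :: t2) :: rest)
      = appliquer_patterns_alt ((a :: b :: c :: t0) :: (d :: e :: f :: t1) :: (g :: h :: i :: t2) :: rest) := by
  set GG := ((a :: b :: c :: t0) :: (d :: e :: f :: t1) :: (g :: h :: i :: t2) :: rest) with hGG
  have hdv0 : PySem.Int.floordiv 0 3 = 0 := by decide
  have hdv1 : PySem.Int.floordiv 1 3 = 0 := by decide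
  have hdv2 : PySem.Int.floordiv 2 3 = 0 := by decide
  have hdv3 : PySem.Int.floordiv 3 3 = 1 := by decide
  have hdv4 : PySem.Int.floordiv 4 3 = 1 := by decide
  have hdv5 : PySem.Int.floordiv 5 3 = 1 := by decide
  have hdv6 : PySem.Int.floordiv 6 3 = 2 := by decide
  have hdv7 : PySem.Int.floordiv 7 3 = 2 := by decide
  have hdv8 : PySem.Int.floordiv 8 3 = 2 := by decide
  have hc00 : pvCell GG 0 0 = a := by rw [pvCell_eval _ _ _ (by norm_num) (by norm_num)]; rfl
  have hc01 : pvCell GG 0 1 = b := by rw [pvCell_eval _ _ _ (by norm_num) (by norm_num)]; rfl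
  have hc02 : pvCell GG 0 2 = c := by rw [pvCell_eval _ _ _ (by norm_num) (by norm_num)]; rfl
  have hc10 : pvCell GG 1 0 = d := by rw [pvCell_eval _ _ _ (by norm_num) (by norm_num)]; rfl
  have hc11 : pvCell GG 1 1 = e := by rw [pvCell_eval _ _ _ (by norm_num) (by norm_num)]; rfl
  have hc12 : pvCell GG 1 2 = f := by rw [pvCell_eval _ _ _ (by norm_num) (by norm_num)]; rfl
  have hc20 : pvCell GG 2 0 = g := by rw [pvCell_eval _ _ _ (by norm_num) (by norm_num)]; rfl
  have hc21 : pvCell GG 2 1 = h := by rw [pvCell_eval _ _ _ (by norm_num) (by norm_num)]; rfl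
  have hc22 : pvCell GG 2 2 = i := by rw [pvCell_eval _ _ _ (by norm_num) (by norm_num)]; rfl
  have hk00 : pvMaskAt 0 0 = 0 := by decide
  have hk01 : pvMaskAt 0 1 = 0 := by decide
  have hk02 : pvMaskAt 0 2 = 1 := by decide
  have hk03 : pvMaskAt 0 3 = 1 := by decide
  have hk04 : pvMaskAt 0 4 = 0 := by decide
  have hk05 : pvMaskAt 0 5 = 1 := by decide
  have hk06 : pvMaskAt 0 6 = 1 := by decide
  have hk07 : pvMaskAt 0 7 = 1 := by decide
  have hk08 : pvMaskAt 0 8 = 0 := by decide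
  have hk10 : pvMaskAt 1 0 = 1 := by decide
  have hk11 : pvMaskAt 1 1 = 1 := by decide
  have hk12 : pvMaskAt 1 2 = 0 := by decide
  have hk13 : pvMaskAt 1 3 = 0 := by decide
  have hk14 : pvMaskAt 1 4 = 0 := by decide
  have hk15 : pvMaskAt 1 5 = 0 := by decide
  have hk16 : pvMaskAt 1 6 = 1 := by decide
  have hk17 : pvMaskAt 1 7 = 0 := by decide
  have hk18 : pvMaskAt 1 8 = 1 := by decide
  have hk20 : pvMaskAt 2 0 = 1 := by decide
  have hk21 : pvMaskAt 2 1 = 1 := by decide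
  have hk22 : pvMaskAt 2 2 = 0 := by decide
  have hk23 : pvMaskAt 2 3 = 1 := by decide
  have hk24 : pvMaskAt 2 4 = 0 := by decide
  have hk25 : pvMaskAt 2 5 = 1 := by decide
  have hk26 : pvMaskAt 2 6 = 0 := by decide
  have hk27 : pvMaskAt 2 7 = 1 := by decide
  have hk28 : pvMaskAt 2 8 = 1 := by decide
  have hk30 : pvMaskAt 3 0 = 1 := by decide
  have hk31 : pvMaskAt 3 1 = 0 := by decide
  have hk32 : pvMaskAt 3 2 = 1 := by decide
  have hk33 : pvMaskAt 3 3 = 1 := by decide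
  have hk34 : pvMaskAt 3 4 = 1 := by decide
  have hk35 : pvMaskAt 3 5 = 0 := by decide
  have hk36 : pvMaskAt 3 6 = 1 := by decide
  have hk37 : pvMaskAt 3 7 = 0 := by decide
  have hk38 : pvMaskAt 3 8 = 1 := by decide
  have hk40 : pvMaskAt 4 0 = 0 := by decide
  have hk41 : pvMaskAt 4 1 = 0 := by decide
  have hk42 : pvMaskAt 4 2 = 0 := by decide
  have hk43 : pvMaskAt 4 3 = 1 := by decide
  have hk44 : pvMaskAt 4 4 = 0 := by decide
  have hk45 : pvMaskAt 4 5 = 1 := by decide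
  have hk46 : pvMaskAt 4 6 = 0 := by decide
  have hk47 : pvMaskAt 4 7 = 0 := by decide
  have hk48 : pvMaskAt 4 8 = 0 := by decide
  have hk50 : pvMaskAt 5 0 = 1 := by decide
  have hk51 : pvMaskAt 5 1 = 0 := by decide
  have hk52 : pvMaskAt 5 2 = 1 := by decide
  have hk53 : pvMaskAt 5 3 = 0 := by decide
  have hk54 : pvMaskAt 5 4 = 1 := by decide
  have hk55 : pvMaskAt 5 5 = 1 := by decide
  have hk56 : pvMaskAt 5 6 = 1 := by decide
  have hk57 : pvMaskAt 5 7 = 0 := by decide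
  have hk58 : pvMaskAt 5 8 = 1 := by decide
  have hk60 : pvMaskAt 6 0 = 1 := by decide
  have hk61 : pvMaskAt 6 1 = 1 := by decide
  have hk62 : pvMaskAt 6 2 = 0 := by decide
  have hk63 : pvMaskAt 6 3 = 1 := by decide
  have hk64 : pvMaskAt 6 4 = 0 := by decide
  have hk65 : pvMaskAt 6 5 = 1 := by decide
  have hk66 : pvMaskAt 6 6 = 0 := by decide
  have hk67 : pvMaskAt 6 7 = 0 := by decide
  have hk68 : pvMaskAt 6 8 = 1 := by decide
  have hk70 : pvMaskAt 7 0 = 1 := by decide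
  have hk71 : pvMaskAt 7 1 = 0 := by decide
  have hk72 : pvMaskAt 7 2 = 1 := by decide
  have hk73 : pvMaskAt 7 3 = 0 := by decide
  have hk74 : pvMaskAt 7 4 = 0 := by decide
  have hk75 : pvMaskAt 7 5 = 0 := by decide
  have hk76 : pvMaskAt 7 6 = 1 := by decide
  have hk77 : pvMaskAt 7 7 = 1 := by decide
  have hk78 : pvMaskAt 7 8 = 0 := by decide
  have hk80 : pvMaskAt 8 0 = 0 := by decide
  have hk81 : pvMaskAt 8 1 = 1 := by decide
  have hk82 : pvMaskAt 8 2 = 1 := by decide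
  have hk83 : pvMaskAt 8 3 = 1 := by decide
  have hk84 : pvMaskAt 8 4 = 0 := by decide
  have hk85 : pvMaskAt 8 5 = 1 := by decide
  have hk86 : pvMaskAt 8 6 = 1 := by decide
  have hk87 : pvMaskAt 8 7 = 1 := by decide
  have hk88 : pvMaskAt 8 8 = 0 := by decide
  have s00 : blockStep GG 0 0
      [[(0:Int), (0:Int), (0:Int), (0:Int), (0:Int), (0:Int), (0:Int), (0:Int), (0:Int)],
     [(0:Int), (0:Int), (0:Int), (0:Int), (0:Int), (0:Int), (0:Int), (0:Int), (0:Int)],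
     [(0:Int), (0:Int), (0:Int), (0:Int), (0:Int), (0:Int), (0:Int), (0:Int), (0:Int)],
     [(0:Int), (0:Int), (0:Int), (0:Int), (0:Int), (0:Int), (0:Int), (0:Int), (0:Int)],
     [(0:Int), (0:Int), (0:Int), (0:Int), (0:Int), (0:Int), (0:Int), (0:Int), (0:Int)],
     [(0:Int), (0:Int), (0:Int), (0:Int), (0:Int), (0:Int), (0:Int), (0:Int), (0:Int)],
     [(0:Int), (0:Int), (0:Int), (0:Int), (0:Int), (0:Int), (0:Int), (0:Int), (0:Int)],
     [(0:Int), (0:Int), (0:Int), (0:Int), (0:Int), (0:Int), (0:Int), (0:Int), (0:Int)],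
     [(0:Int), (0:Int), (0:Int), (0:Int), (0:Int), (0:Int), (0:Int), (0:Int), (0:Int)]] =
      [[(0:Int), (0:Int), a, (0:Int), (0:Int), (0:Int), (0:Int), (0:Int), (0:Int)],
     [a, a, (0:Int), (0:Int), (0:Int), (0:Int), (0:Int), (0:Int), (0:Int)],
     [a, a, (0:Int), (0:Int), (0:Int), (0:Int), (0:Int), (0:Int), (0:Int)],
     [(0:Int), (0:Int), (0:Int), (0:Int), (0:Int), (0:Int), (0:Int), (0:Int), (0:Int)],
     [(0:Int), (0:Int), (0:Int), (0:Int), (0:Int), (0:Int), (0:Int), (0:Int), (0:Int)],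
     [(0:Int), (0:Int), (0:Int), (0:Int), (0:Int), (0:Int), (0:Int), (0:Int), (0:Int)],
     [(0:Int), (0:Int), (0:Int), (0:Int), (0:Int), (0:Int), (0:Int), (0:Int), (0:Int)],
     [(0:Int), (0:Int), (0:Int), (0:Int), (0:Int), (0:Int), (0:Int), (0:Int), (0:Int)],
     [(0:Int), (0:Int), (0:Int), (0:Int), (0:Int), (0:Int), (0:Int), (0:Int), (0:Int)]] := by
    by_cases hv : a = 0
    · subst hv
      simp only [blockStep, hc00]
      rw [if_neg (by decide : ¬((0:Int) ≠ 0))]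
    · simp only [blockStep, hc00]
      rw [if_pos hv]
      rfl
  have s01 : blockStep GG 0 1
      [[(0:Int), (0:Int), a, (0:Int), (0:Int), (0:Int), (0:Int), (0:Int), (0:Int)],
     [a, a, (0:Int), (0:Int), (0:Int), (0:Int), (0:Int), (0:Int), (0:Int)],
     [a, a, (0:Int), (0:Int), (0:Int), (0:Int), (0:Int), (0:Int), (0:Int)],
     [(0:Int), (0:Int), (0:Int), (0:Int), (0:Int), (0:Int), (0:Int), (0:Int), (0:Int)],
     [(0:Int), (0:Int), (0:Int), (0:Int), (0:Int), (0:Int), (0:Int), (0:Int), (0:Int)],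
     [(0:Int), (0:Int), (0:Int), (0:Int), (0:Int), (0:Int), (0:Int), (0:Int), (0:Int)],
     [(0:Int), (0:Int), (0:Int), (0:Int), (0:Int), (0:Int), (0:Int), (0:Int), (0:Int)],
     [(0:Int), (0:Int), (0:Int), (0:Int), (0:Int), (0:Int), (0:Int), (0:Int), (0:Int)],
     [(0:Int), (0:Int), (0:Int), (0:Int), (0:Int), (0:Int), (0:Int), (0:Int), (0:Int)]] =
      [[(0:Int), (0:Int), a, b, (0:Int), b, (0:Int), (0:Int), (0:Int)],
     [a, a, (0:Int), (0:Int), (0:Int), (0:Int), (0:Int), (0:Int), (0:Int)],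
     [a, a, (0:Int), b, (0:Int), b, (0:Int), (0:Int), (0:Int)],
     [(0:Int), (0:Int), (0:Int), (0:Int), (0:Int), (0:Int), (0:Int), (0:Int), (0:Int)],
     [(0:Int), (0:Int), (0:Int), (0:Int), (0:Int), (0:Int), (0:Int), (0:Int), (0:Int)],
     [(0:Int), (0:Int), (0:Int), (0:Int), (0:Int), (0:Int), (0:Int), (0:Int), (0:Int)],
     [(0:Int), (0:Int), (0:Int), (0:Int), (0:Int), (0:Int), (0:Int), (0:Int), (0:Int)],
     [(0:Int), (0:Int), (0:Int), (0:Int), (0:Int), (0:Int), (0:Int), (0:Int), (0:Int)],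
     [(0:Int), (0:Int), (0:Int), (0:Int), (0:Int), (0:Int), (0:Int), (0:Int), (0:Int)]] := by
    by_cases hv : b = 0
    · subst hv
      simp only [blockStep, hc01]
      rw [if_neg (by decide : ¬((0:Int) ≠ 0))]
    · simp only [blockStep, hc01]
      rw [if_pos hv]
      rfl
  have s02 : blockStep GG 0 2
      [[(0:Int), (0:Int), a, b, (0:Int), b, (0:Int), (0:Int), (0:Int)],
     [a, a, (0:Int), (0:Int), (0:Int), (0:Int), (0:Int), (0:Int), (0:Int)],
     [a, a, (0:Int), b, (0:Int), b, (0:Int), (0:Int), (0:Int)],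
     [(0:Int), (0:Int), (0:Int), (0:Int), (0:Int), (0:Int), (0:Int), (0:Int), (0:Int)],
     [(0:Int), (0:Int), (0:Int), (0:Int), (0:Int), (0:Int), (0:Int), (0:Int), (0:Int)],
     [(0:Int), (0:Int), (0:Int), (0:Int), (0:Int), (0:Int), (0:Int), (0:Int), (0:Int)],
     [(0:Int), (0:Int), (0:Int), (0:Int), (0:Int), (0:Int), (0:Int), (0:Int), (0:Int)],
     [(0:Int), (0:Int), (0:Int), (0:Int), (0:Int), (0:Int), (0:Int), (0:Int), (0:Int)],
     [(0:Int), (0:Int), (0:Int), (0:Int), (0:Int), (0:Int), (0:Int), (0:Int), (0:Int)]] =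
      [[(0:Int), (0:Int), a, b, (0:Int), b, c, c, (0:Int)],
     [a, a, (0:Int), (0:Int), (0:Int), (0:Int), c, (0:Int), c],
     [a, a, (0:Int), b, (0:Int), b, (0:Int), c, c],
     [(0:Int), (0:Int), (0:Int), (0:Int), (0:Int), (0:Int), (0:Int), (0:Int), (0:Int)],
     [(0:Int), (0:Int), (0:Int), (0:Int), (0:Int), (0:Int), (0:Int), (0:Int), (0:Int)],
     [(0:Int), (0:Int), (0:Int), (0:Int), (0:Int), (0:Int), (0:Int), (0:Int), (0:Int)],
     [(0:Int), (0:Int), (0:Int), (0:Int), (0:Int), (0:Int), (0:Int), (0:Int), (0:Int)],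
     [(0:Int), (0:Int), (0:Int), (0:Int), (0:Int), (0:Int), (0:Int), (0:Int), (0:Int)],
     [(0:Int), (0:Int), (0:Int), (0:Int), (0:Int), (0:Int), (0:Int), (0:Int), (0:Int)]] := by
    by_cases hv : c = 0
    · subst hv
      simp only [blockStep, hc02]
      rw [if_neg (by decide : ¬((0:Int) ≠ 0))]
    · simp only [blockStep, hc02]
      rw [if_pos hv]
      rfl
  have s10 : blockStep GG 1 0
      [[(0:Int), (0:Int), a, b, (0:Int), b, c, c, (0:Int)],
     [a, a, (0:Int), (0:Int), (0:Int), (0:Int), c, (0:Int), c],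
     [a, a, (0:Int), b, (0:Int), b, (0:Int), c, c],
     [(0:Int), (0:Int), (0:Int), (0:Int), (0:Int), (0:Int), (0:Int), (0:Int), (0:Int)],
     [(0:Int), (0:Int), (0:Int), (0:Int), (0:Int), (0:Int), (0:Int), (0:Int), (0:Int)],
     [(0:Int), (0:Int), (0:Int), (0:Int), (0:Int), (0:Int), (0:Int), (0:Int), (0:Int)],
     [(0:Int), (0:Int), (0:Int), (0:Int), (0:Int), (0:Int), (0:Int), (0:Int), (0:Int)],
     [(0:Int), (0:Int), (0:Int), (0:Int), (0:Int), (0:Int), (0:Int), (0:Int), (0:Int)],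
     [(0:Int), (0:Int), (0:Int), (0:Int), (0:Int), (0:Int), (0:Int), (0:Int), (0:Int)]] =
      [[(0:Int), (0:Int), a, b, (0:Int), b, c, c, (0:Int)],
     [a, a, (0:Int), (0:Int), (0:Int), (0:Int), c, (0:Int), c],
     [a, a, (0:Int), b, (0:Int), b, (0:Int), c, c],
     [d, (0:Int), d, (0:Int), (0:Int), (0:Int), (0:Int), (0:Int), (0:Int)],
     [(0:Int), (0:Int), (0:Int), (0:Int), (0:Int), (0:Int), (0:Int), (0:Int), (0:Int)],
     [d, (0:Int), d, (0:Int), (0:Int), (0:Int), (0:Int), (0:Int), (0:Int)],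
     [(0:Int), (0:Int), (0:Int), (0:Int), (0:Int), (0:Int), (0:Int), (0:Int), (0:Int)],
     [(0:Int), (0:Int), (0:Int), (0:Int), (0:Int), (0:Int), (0:Int), (0:Int), (0:Int)],
     [(0:Int), (0:Int), (0:Int), (0:Int), (0:Int), (0:Int), (0:Int), (0:Int), (0:Int)]] := by
    by_cases hv : d = 0
    · subst hv
      simp only [blockStep, hc10]
      rw [if_neg (by decide : ¬((0:Int) ≠ 0))]
    · simp only [blockStep, hc10]
      rw [if_pos hv]
      rfl
  have s11 : blockStep GG 1 1
      [[(0:Int), (0:Int), a, b, (0:Int), b, c, c, (0:Int)],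
     [a, a, (0:Int), (0:Int), (0:Int), (0:Int), c, (0:Int), c],
     [a, a, (0:Int), b, (0:Int), b, (0:Int), c, c],
     [d, (0:Int), d, (0:Int), (0:Int), (0:Int), (0:Int), (0:Int), (0:Int)],
     [(0:Int), (0:Int), (0:Int), (0:Int), (0:Int), (0:Int), (0:Int), (0:Int), (0:Int)],
     [d, (0:Int), d, (0:Int), (0:Int), (0:Int), (0:Int), (0:Int), (0:Int)],
     [(0:Int), (0:Int), (0:Int), (0:Int), (0:Int), (0:Int), (0:Int), (0:Int), (0:Int)],
     [(0:Int), (0:Int), (0:Int), (0:Int), (0:Int), (0:Int), (0:Int), (0:Int), (0:Int)],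
     [(0:Int), (0:Int), (0:Int), (0:Int), (0:Int), (0:Int), (0:Int), (0:Int), (0:Int)]] =
      [[(0:Int), (0:Int), a, b, (0:Int), b, c, c, (0:Int)],
     [a, a, (0:Int), (0:Int), (0:Int), (0:Int), c, (0:Int), c],
     [a, a, (0:Int), b, (0:Int), b, (0:Int), c, c],
     [d, (0:Int), d, e, e, (0:Int), (0:Int), (0:Int), (0:Int)],
     [(0:Int), (0:Int), (0:Int), e, (0:Int), e, (0:Int), (0:Int), (0:Int)],
     [d, (0:Int), d, (0:Int), e, e, (0:Int), (0:Int), (0:Int)],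
     [(0:Int), (0:Int), (0:Int), (0:Int), (0:Int), (0:Int), (0:Int), (0:Int), (0:Int)],
     [(0:Int), (0:Int), (0:Int), (0:Int), (0:Int), (0:Int), (0:Int), (0:Int), (0:Int)],
     [(0:Int), (0:Int), (0:Int), (0:Int), (0:Int), (0:Int), (0:Int), (0:Int), (0:Int)]] := by
    by_cases hv : e = 0
    · subst hv
      simp only [blockStep, hc11]
      rw [if_neg (by decide : ¬((0:Int) ≠ 0))]
    · simp only [blockStep, hc11]
      rw [if_pos hv]
      rfl
  have s12 : blockStep GG 1 2
      [[(0:Int), (0:Int), a, b, (0:Int), b, c, c, (0:Int)],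
     [a, a, (0:Int), (0:Int), (0:Int), (0:Int), c, (0:Int), c],
     [a, a, (0:Int), b, (0:Int), b, (0:Int), c, c],
     [d, (0:Int), d, e, e, (0:Int), (0:Int), (0:Int), (0:Int)],
     [(0:Int), (0:Int), (0:Int), e, (0:Int), e, (0:Int), (0:Int), (0:Int)],
     [d, (0:Int), d, (0:Int), e, e, (0:Int), (0:Int), (0:Int)],
     [(0:Int), (0:Int), (0:Int), (0:Int), (0:Int), (0:Int), (0:Int), (0:Int), (0:Int)],
     [(0:Int), (0:Int), (0:Int), (0:Int), (0:Int), (0:Int), (0:Int), (0:Int), (0:Int)],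
     [(0:Int), (0:Int), (0:Int), (0:Int), (0:Int), (0:Int), (0:Int), (0:Int), (0:Int)]] =
      [[(0:Int), (0:Int), a, b, (0:Int), b, c, c, (0:Int)],
     [a, a, (0:Int), (0:Int), (0:Int), (0:Int), c, (0:Int), c],
     [a, a, (0:Int), b, (0:Int), b, (0:Int), c, c],
     [d, (0:Int), d, e, e, (0:Int), f, (0:Int), f],
     [(0:Int), (0:Int), (0:Int), e, (0:Int), e, (0:Int), (0:Int), (0:Int)],
     [d, (0:Int), d, (0:Int), e, e, f, (0:Int), f],
     [(0:Int), (0:Int), (0:Int), (0:Int), (0:Int), (0:Int), (0:Int), (0:Int), (0:Int)],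
     [(0:Int), (0:Int), (0:Int), (0:Int), (0:Int), (0:Int), (0:Int), (0:Int), (0:Int)],
     [(0:Int), (0:Int), (0:Int), (0:Int), (0:Int), (0:Int), (0:Int), (0:Int), (0:Int)]] := by
    by_cases hv : f = 0
    · subst hv
      simp only [blockStep, hc12]
      rw [if_neg (by decide : ¬((0:Int) ≠ 0))]
    · simp only [blockStep, hc12]
      rw [if_pos hv]
      rfl
  have s20 : blockStep GG 2 0
      [[(0:Int), (0:Int), a, b, (0:Int), b, c, c, (0:Int)],
     [a, a, (0:Int), (0:Int), (0:Int), (0:Int), c, (0:Int), c],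
     [a, a, (0:Int), b, (0:Int), b, (0:Int), c, c],
     [d, (0:Int), d, e, e, (0:Int), f, (0:Int), f],
     [(0:Int), (0:Int), (0:Int), e, (0:Int), e, (0:Int), (0:Int), (0:Int)],
     [d, (0:Int), d, (0:Int), e, e, f, (0:Int), f],
     [(0:Int), (0:Int), (0:Int), (0:Int), (0:Int), (0:Int), (0:Int), (0:Int), (0:Int)],
     [(0:Int), (0:Int), (0:Int), (0:Int), (0:Int), (0:Int), (0:Int), (0:Int), (0:Int)],
     [(0:Int), (0:Int), (0:Int), (0:Int), (0:Int), (0:Int), (0:Int), (0:Int), (0:Int)]] =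
      [[(0:Int), (0:Int), a, b, (0:Int), b, c, c, (0:Int)],
     [a, a, (0:Int), (0:Int), (0:Int), (0:Int), c, (0:Int), c],
     [a, a, (0:Int), b, (0:Int), b, (0:Int), c, c],
     [d, (0:Int), d, e, e, (0:Int), f, (0:Int), f],
     [(0:Int), (0:Int), (0:Int), e, (0:Int), e, (0:Int), (0:Int), (0:Int)],
     [d, (0:Int), d, (0:Int), e, e, f, (0:Int), f],
     [g, g, (0:Int), (0:Int), (0:Int), (0:Int), (0:Int), (0:Int), (0:Int)],
     [g, (0:Int), g, (0:Int), (0:Int), (0:Int), (0:Int), (0:Int), (0:Int)],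
     [(0:Int), g, g, (0:Int), (0:Int), (0:Int), (0:Int), (0:Int), (0:Int)]] := by
    by_cases hv : g = 0
    · subst hv
      simp only [blockStep, hc20]
      rw [if_neg (by decide : ¬((0:Int) ≠ 0))]
    · simp only [blockStep, hc20]
      rw [if_pos hv]
      rfl
  have s21 : blockStep GG 2 1
      [[(0:Int), (0:Int), a, b, (0:Int), b, c, c, (0:Int)],
     [a, a, (0:Int), (0:Int), (0:Int), (0:Int), c, (0:Int), c],
     [a, a, (0:Int), b, (0:Int), b, (0:Int), c, c],
     [d, (0:Int), d, e, e, (0:Int), f, (0:Int), f],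
     [(0:Int), (0:Int), (0:Int), e, (0:Int), e, (0:Int), (0:Int), (0:Int)],
     [d, (0:Int), d, (0:Int), e, e, f, (0:Int), f],
     [g, g, (0:Int), (0:Int), (0:Int), (0:Int), (0:Int), (0:Int), (0:Int)],
     [g, (0:Int), g, (0:Int), (0:Int), (0:Int), (0:Int), (0:Int), (0:Int)],
     [(0:Int), g, g, (0:Int), (0:Int), (0:Int), (0:Int), (0:Int), (0:Int)]] =
      [[(0:Int), (0:Int), a, b, (0:Int), b, c, c, (0:Int)],
     [a, a, (0:Int), (0:Int), (0:Int), (0:Int), c, (0:Int), c],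
     [a, a, (0:Int), b, (0:Int), b, (0:Int), c, c],
     [d, (0:Int), d, e, e, (0:Int), f, (0:Int), f],
     [(0:Int), (0:Int), (0:Int), e, (0:Int), e, (0:Int), (0:Int), (0:Int)],
     [d, (0:Int), d, (0:Int), e, e, f, (0:Int), f],
     [g, g, (0:Int), h, (0:Int), h, (0:Int), (0:Int), (0:Int)],
     [g, (0:Int), g, (0:Int), (0:Int), (0:Int), (0:Int), (0:Int), (0:Int)],
     [(0:Int), g, g, h, (0:Int), h, (0:Int), (0:Int), (0:Int)]] := by
    by_cases hv : h = 0
    · subst hv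
      simp only [blockStep, hc21]
      rw [if_neg (by decide : ¬((0:Int) ≠ 0))]
    · simp only [blockStep, hc21]
      rw [if_pos hv]
      rfl
  have s22 : blockStep GG 2 2
      [[(0:Int), (0:Int), a, b, (0:Int), b, c, c, (0:Int)],
     [a, a, (0:Int), (0:Int), (0:Int), (0:Int), c, (0:Int), c],
     [a, a, (0:Int), b, (0:Int), b, (0:Int), c, c],
     [d, (0:Int), d, e, e, (0:Int), f, (0:Int), f],
     [(0:Int), (0:Int), (0:Int), e, (0:Int), e, (0:Int), (0:Int), (0:Int)],
     [d, (0:Int), d, (0:Int), e, e, f, (0:Int), f],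
     [g, g, (0:Int), h, (0:Int), h, (0:Int), (0:Int), (0:Int)],
     [g, (0:Int), g, (0:Int), (0:Int), (0:Int), (0:Int), (0:Int), (0:Int)],
     [(0:Int), g, g, h, (0:Int), h, (0:Int), (0:Int), (0:Int)]] =
      [[(0:Int), (0:Int), a, b, (0:Int), b, c, c, (0:Int)],
     [a, a, (0:Int), (0:Int), (0:Int), (0:Int), c, (0:Int), c],
     [a, a, (0:Int), b, (0:Int), b, (0:Int), c, c],
     [d, (0:Int), d, e, e, (0:Int), f, (0:Int), f],
     [(0:Int), (0:Int), (0:Int), e, (0:Int), e, (0:Int), (0:Int), (0:Int)],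
     [d, (0:Int), d, (0:Int), e, e, f, (0:Int), f],
     [g, g, (0:Int), h, (0:Int), h, (0:Int), (0:Int), i],
     [g, (0:Int), g, (0:Int), (0:Int), (0:Int), i, i, (0:Int)],
     [(0:Int), g, g, h, (0:Int), h, i, i, (0:Int)]] := by
    by_cases hv : i = 0
    · subst hv
      simp only [blockStep, hc22]
      rw [if_neg (by decide : ¬((0:Int) ≠ 0))]
    · simp only [blockStep, hc22]
      rw [if_pos hv]
      rfl
  have hA : appliquer_patterns GG = [[(0:Int), (0:Int), a, b, (0:Int), b, c, c, (0:Int)],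
     [a, a, (0:Int), (0:Int), (0:Int), (0:Int), c, (0:Int), c],
     [a, a, (0:Int), b, (0:Int), b, (0:Int), c, c],
     [d, (0:Int), d, e, e, (0:Int), f, (0:Int), f],
     [(0:Int), (0:Int), (0:Int), e, (0:Int), e, (0:Int), (0:Int), (0:Int)],
     [d, (0:Int), d, (0:Int), e, e, f, (0:Int), f],
     [g, g, (0:Int), h, (0:Int), h, (0:Int), (0:Int), i],
     [g, (0:Int), g, (0:Int), (0:Int), (0:Int), i, i, (0:Int)],
     [(0:Int), g, g, h, (0:Int), h, i, i, (0:Int)]] := by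
    simp only [appliquer_patterns, List.foldl, List.map,
      show PySem.List.pyRange 0 3 1 = [0, 1, 2] from by decide,
      show PySem.List.pyRange 0 9 1 = [0, 1, 2, 3, 4, 5, 6, 7, 8] from by decide]
    rw [s00, s01, s02, s10, s11, s12, s20, s21, s22]
  have hB : appliquer_patterns_alt GG = [[(0:Int), (0:Int), a, b, (0:Int), b, c, c, (0:Int)],
     [a, a, (0:Int), (0:Int), (0:Int), (0:Int), c, (0:Int), c],
     [a, a, (0:Int), b, (0:Int), b, (0:Int), c, c],
     [d, (0:Int), d, e, e, (0:Int), f, (0:Int), f],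
     [(0:Int), (0:Int), (0:Int), e, (0:Int), e, (0:Int), (0:Int), (0:Int)],
     [d, (0:Int), d, (0:Int), e, e, f, (0:Int), f],
     [g, g, (0:Int), h, (0:Int), h, (0:Int), (0:Int), i],
     [g, (0:Int), g, (0:Int), (0:Int), (0:Int), i, i, (0:Int)],
     [(0:Int), g, g, h, (0:Int), h, i, i, (0:Int)]] := by
    simp only [appliquer_patterns_alt, List.map,
      show PySem.List.pyRange 0 9 1 = [0, 1, 2, 3, 4, 5, 6, 7, 8] from by decide]
    simp only [hdv0, hdv1, hdv2, hdv3, hdv4, hdv5, hdv6, hdv7, hdv8]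
    simp only [hc00, hc01, hc02, hc10, hc11, hc12, hc20, hc21, hc22]
    simp only [hk00, hk01, hk02, hk03, hk04, hk05, hk06, hk07, hk08, hk10, hk11, hk12, hk13, hk14, hk15, hk16, hk17, hk18, hk20, hk21, hk22, hk23, hk24, hk25, hk26, hk27, hk28, hk30, hk31, hk32, hk33, hk34, hk35, hk36, hk37, hk38, hk40, hk41, hk42, hk43, hk44, hk45, hk46, hk47, hk48, hk50, hk51, hk52, hk53, hk54, hk55, hk56, hk57, hk58, hk60, hk61, hk62, hk63, hk64, hk65, hk66, hk67, hk68, hk70, hk71, hk72, hk73, hk74, hk75, hk76, hk77, hk78, hk80, hk81, hk82, hk83, hk84, hk85, hk86, hk87, hk88]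
    simp only [mul_zero, mul_one]
  rw [hA, hB]

-- ===== VERDICT (by name: the statement is the Claim_ definition above) =====
theorem appliquer_patterns_spec : Claim_equal_appliquer_patterns := by
  intro input_grid _ hpre
  obtain ⟨hlen, hrows⟩ := hpre
  match input_grid, hlen with
  | r0 :: r1 :: r2 :: rest, _ =>
    have h0 := hrows r0 (by simp)
    have h1 := hrows r1 (by simp)
    have h2 := hrows r2 (by simp)
    match r0, h0 with
    | a :: b :: c :: t0, _ =>
    match r1, h1 with
    | d :: e :: f :: t1, _ =>
    match r2, h2 with
    | g :: h :: i :: t2, _ =>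
      exact key_lemma a b c d e f g h i t0 t1 t2 rest
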